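-- pv_equiv track=rewrite | github.com/likai-xixi/sili-jian-orchestrator | assets/project-skeleton/ai/tools/validate_gates.py | section_has_items
-- ===== SOURCE A (Python) =====
-- def section_has_items(text: str, heading: str) -> bool:
--     capture = False
--     for line in text.splitlines():
--         stripped = line.strip()
--         if stripped.startswith("## "):
--             capture = stripped[3:].strip().lower() == heading.strip().lower()
--             continue
--         if not capture or not stripped:
--             continue
--         if stripped.startswith("- "):
--             value = stripped[2:].strip()
--             if value and value.lower() not in {"none", "n/a", "na"}:
--                 return True
--         elif stripped.lower() not in {"none", "n/a", "na"}:
--             return True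
--     return False
-- ===== SOURCE B (Python) =====
-- PLACEHOLDERS = {"none", "n/a", "na"}
--
--
-- def _qualifies(s):
--     # s is an already-stripped line
--     if not s:
--         return False
--     if s.startswith("- "):
--         v = s[2:].strip()
--         return bool(v) and v.lower() not in PLACEHOLDERS
--     return s.lower() not in PLACEHOLDERS
--
--
-- def section_has_items(text: str, heading: str) -> bool:
--     # Build (normalized-heading, stripped-body-lines) groups once, then query.
--     lines = text.splitlines()
--     n = len(lines)
--     groups = []
--     i = 0
--     while i < n:
--         s = lines[i].strip()
--         i += 1
--         if s.startswith("## "):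
--             body = []
--             while i < n and not lines[i].strip().startswith("## "):
--                 body.append(lines[i].strip())
--                 i += 1
--             groups.append((s[3:].strip().lower(), body))
--     target = heading.strip().lower()
--     return any(key == target and any(_qualifies(b) for b in body)
--                for key, body in groups)
-- ===== Notes on version B (the rewrite author's own statement) =====
-- stated objective: alternative
-- what changed: Replaces A's single flag-driven pass with a build-then-query decomposition: first parse the text into (normalized heading, stripped body lines) groups, then report whether any group matching the heading contains a qualifying line.
import Mathlib
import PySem

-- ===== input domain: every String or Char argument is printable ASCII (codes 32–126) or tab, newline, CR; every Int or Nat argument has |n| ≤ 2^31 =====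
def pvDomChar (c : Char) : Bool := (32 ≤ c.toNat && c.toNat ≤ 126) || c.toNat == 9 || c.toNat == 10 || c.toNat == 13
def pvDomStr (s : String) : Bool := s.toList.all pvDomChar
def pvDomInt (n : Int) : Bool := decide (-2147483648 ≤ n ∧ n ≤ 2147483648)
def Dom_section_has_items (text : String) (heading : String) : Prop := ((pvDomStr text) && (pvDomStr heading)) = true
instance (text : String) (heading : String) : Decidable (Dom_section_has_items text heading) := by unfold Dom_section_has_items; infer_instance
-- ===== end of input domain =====

-- B changes the decomposition only (build groups, then query); same O(n) cost, return value proved equal.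
-- ===== PORT A =====
def pvPlaceholders : List (List Char) := ["none".toList, "n/a".toList, "na".toList]

-- A's loop: one pass with a capture flag
def aGo (target : List Char) (capture : Bool) : List (List Char) → Bool
  | [] => false
  | line :: rest =>
    let stripped := PySem.Chars.strip line
    if PySem.Chars.startswith stripped "## ".toList then
      aGo target (PySem.Chars.lower (PySem.Chars.strip (PySem.List.slice stripped (some 3) none)) == target) rest
    else if !capture || stripped.isEmpty then
      aGo target capture rest
    else if PySem.Chars.startswith stripped "- ".toList then
      if !(PySem.Chars.strip (PySem.List.slice stripped (some 2) none)).isEmpty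
         && !pvPlaceholders.contains (PySem.Chars.lower (PySem.Chars.strip (PySem.List.slice stripped (some 2) none))) then
        true
      else
        aGo target capture rest
    else if !pvPlaceholders.contains (PySem.Chars.lower stripped) then
      true
    else
      aGo target capture rest

def section_has_items (text : String) (heading : String) : Bool :=
  aGo (PySem.Chars.lower (PySem.Chars.strip heading.toList)) false
    ((PySem.Str.splitlines text).map String.toList)

-- ===== PORT B =====
-- B-side helpers: predicate on a stripped line, heading test, group builder
def bQualifies (s : List Char) : Bool :=
  if s.isEmpty then false
  else if PySem.Chars.startswith s "- ".toList then
    !(PySem.Chars.strip (PySem.List.slice s (some 2) none)).isEmpty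
      && !pvPlaceholders.contains (PySem.Chars.lower (PySem.Chars.strip (PySem.List.slice s (some 2) none)))
  else !pvPlaceholders.contains (PySem.Chars.lower s)

def bIsHeading (line : List Char) : Bool :=
  PySem.Chars.startswith (PySem.Chars.strip line) "## ".toList

-- collect (normalized key, stripped body lines) groups
def bGroups : List (List Char) → List (List Char × List (List Char))
  | [] => []
  | line :: rest =>
    if bIsHeading line then
      (PySem.Chars.lower (PySem.Chars.strip (PySem.List.slice (PySem.Chars.strip line) (some 3) none)),
        (rest.takeWhile (fun l => !bIsHeading l)).map PySem.Chars.strip)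
        :: bGroups (rest.dropWhile (fun l => !bIsHeading l))
    else
      bGroups rest
  termination_by l => l.length
  decreasing_by
    · have := List.length_dropWhile_le (fun l => !bIsHeading l) rest
      simp only [List.length_cons]; omega
    · simp

def section_has_items_alt (text : String) (heading : String) : Bool :=
  let target := PySem.Chars.lower (PySem.Chars.strip heading.toList)
  (bGroups ((PySem.Str.splitlines text).map String.toList)).any
    (fun g => g.1 == target && g.2.any bQualifies)

-- ===== PRECONDITION & SPEC =====
def Spec_section_has_items (text : String) (heading : String) (out : Bool) : Prop := out = section_has_items_alt text heading
instance (text : String) (heading : String) (out : Bool) : Decidable (Spec_section_has_items text heading out) := by unfold Spec_section_has_items; infer_instance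

-- ===== CLAIM (what is proved, stated in full; the proofs are below) =====
def Claim_equal_section_has_items : Prop := ∀ (text : String) (heading : String), Dom_section_has_items text heading → Spec_section_has_items text heading (section_has_items text heading)

-- ===== LEMMAS AND PROOFS =====

theorem bGroups_skip (l : List (List Char)) :
    bGroups (l.dropWhile (fun x => !bIsHeading x)) = bGroups l := by
  induction l with
  | nil => rfl
  | cons x xs ih =>
    by_cases h : bIsHeading x
    · simp [h]
    · simp [h, bGroups, ih]

theorem aGo_eq (target : List Char) (capture : Bool) (lines : List (List Char)) :
    aGo target capture lines =
      ((capture && (lines.takeWhile (fun l => !bIsHeading l)).any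
          (fun l => bQualifies (PySem.Chars.strip l)))
        || (bGroups lines).any (fun g => g.1 == target && g.2.any bQualifies)) := by
  induction lines generalizing capture with
  | nil => simp [aGo, bGroups]
  | cons line rest ih =>
    by_cases h : bIsHeading line
    · have h' : PySem.Chars.startswith (PySem.Chars.strip line) ['#', '#', ' '] = true := by
        simpa [bIsHeading] using h
      rw [show aGo target capture (line :: rest)
          = aGo target (PySem.Chars.lower (PySem.Chars.strip
              (PySem.List.slice (PySem.Chars.strip line) (some 3) none)) == target) rest
          from by simp [aGo, h']]
      rw [ih]
      simp [h, bGroups, bGroups_skip, List.any_map, Function.comp_def]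
    · have h' : PySem.Chars.startswith (PySem.Chars.strip line) "## ".toList = false := by
        simpa [bIsHeading] using h
      have step : aGo target capture (line :: rest)
          = if capture && bQualifies (PySem.Chars.strip line) then true
            else aGo target capture rest := by
        simp only [aGo, h', Bool.false_eq_true, if_false, bQualifies]
        cases capture <;> split_ifs <;> simp_all
      rw [step, ih]
      have hg : bGroups (line :: rest) = bGroups rest := by simp [bGroups, h]
      rw [hg]
      simp only [List.takeWhile_cons, h, Bool.not_false, if_pos, List.any_cons]
      cases capture <;> cases bQualifies (PySem.Chars.strip line) <;> simp

-- ===== VERDICT (by name: the statement is the Claim_ definition above) =====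
theorem section_has_items_spec : Claim_equal_section_has_items := by
  intro text heading _
  unfold Spec_section_has_items section_has_items section_has_items_alt
  rw [aGo_eq]
  simp
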